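-- pv_equiv track=rewrite | github.com/miliar/Code_Jam_Webscraper | solutions_python/solutions_year17_round0_nr3/2983.py | place_next
-- ===== SOURCE A (Python) =====
-- def place_next(s):
--     j = 0
--     ls = 0
--     rs = 0
--     ms = 0
--     for i in range(1, len(s)):
--         if s[i]:
--             continue
--
--         # calc left
--         k = i
--         while k > 0 and not s[k]:
--             k -= 1
--         a = i - k - 1
--
--         # calc right
--         k = i
--         while k < len(s) and not s[k]:
--             k += 1
--         b = k - i - 1
--
--         # check max
--         if min(a, b) > ms:
--             j = i
--             ls = a
--             rs = b
--             ms = min(a, b)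
--         elif min(a, b) == ms and max(a, b) > ms:
--             j = i
--             ls = a
--             rs = b
--             ms = min(a, b)
--
--     return j, ls, rs
-- ===== SOURCE B (Python) =====
-- def place_next(s):
--     n = len(s)
--     # nearest occupied index <= i (or 0 if none), one left-to-right pass
--     prev = [0] * n
--     p = 0
--     for i in range(n):
--         if s[i]:
--             p = i
--         prev[i] = p
--     # nearest occupied index >= i (or n if none), one right-to-left pass
--     nxt = [0] * n
--     q = n
--     for i in range(n - 1, -1, -1):
--         if s[i]:
--             q = i
--         nxt[i] = q
--     j = ls = rs = ms = 0
--     for i in range(1, n):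
--         if s[i]:
--             continue
--         a = i - prev[i] - 1
--         b = nxt[i] - i - 1
--         m = min(a, b)
--         if m > ms or (m == ms and max(a, b) > ms):
--             j, ls, rs, ms = i, a, b, m
--     return j, ls, rs
-- ===== Notes on version B (the rewrite author's own statement) =====
-- stated objective: alternative
-- what changed: Replaced A's per-seat left/right rescans with two precomputed nearest-occupied arrays (one forward pass, one backward pass), so each seat's run lengths become O(1) lookups instead of inner while-loop scans.
import Mathlib
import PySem

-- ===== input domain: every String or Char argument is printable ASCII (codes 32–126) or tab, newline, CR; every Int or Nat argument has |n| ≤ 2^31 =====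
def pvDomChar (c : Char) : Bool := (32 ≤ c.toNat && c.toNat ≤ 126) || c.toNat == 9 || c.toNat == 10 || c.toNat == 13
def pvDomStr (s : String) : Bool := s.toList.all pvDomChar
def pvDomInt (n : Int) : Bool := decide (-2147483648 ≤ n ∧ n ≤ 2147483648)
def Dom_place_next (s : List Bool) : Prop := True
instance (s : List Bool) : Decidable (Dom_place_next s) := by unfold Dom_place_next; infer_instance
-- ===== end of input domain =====

-- B replaces A's per-seat left/right rescans with two nearest-occupied precompute passes
-- and O(1) lookups per seat (objective: alternative algorithm; not measured faster).
-- All list indexing in both Pythons is in range, so List.getD is an exact port of s[i] here.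

-- ===== PORT A =====
-- 'while k > 0 and not s[k]: k -= 1' starting at k
def leftScanA (s : List Bool) : Nat → Nat
  | 0 => 0
  | k + 1 => if s.getD (k + 1) false then k + 1 else leftScanA s k

-- 'while k < len(s) and not s[k]: k += 1' starting at k
def rightScanA (s : List Bool) (k : Nat) : Nat :=
  if k < s.length ∧ s.getD k false = false then rightScanA s (k + 1) else k
termination_by s.length - k
decreasing_by omega

def place_next (s : List Bool) : Int × Int × Int :=
  let st := (List.range' 1 (s.length - 1)).foldl
    (fun (st : Int × Int × Int × Int) (i : Nat) =>
      if s.getD i false then st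
      else
        let a : Int := (i : Int) - (leftScanA s i : Int) - 1
        let b : Int := (rightScanA s i : Int) - (i : Int) - 1
        if min a b > st.2.2.2 then ((i : Int), a, b, min a b)
        else if min a b = st.2.2.2 ∧ max a b > st.2.2.2 then ((i : Int), a, b, min a b)
        else st)
    (0, 0, 0, 0)
  (st.1, st.2.1, st.2.2.1)

-- ===== PORT B =====
-- left-to-right pass building prev: prev[i] = last occupied index ≤ i (0 if none)
def prevListB : List Bool → Nat → Nat → List Nat
  | [], _, _ => []
  | x :: xs, i, p =>
      let p' := if x then i else p
      p' :: prevListB xs (i + 1) p'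

-- right-to-left pass building nxt: nxt[i] = first occupied index ≥ i (n if none);
-- built by recursion on the list (each entry is i if occupied, else the next entry, default n)
def nxtListB (n : Nat) : List Bool → Nat → List Nat
  | [], _ => []
  | x :: xs, i =>
      let rest := nxtListB n xs (i + 1)
      (if x then i else rest.headD n) :: rest

def place_next_alt (s : List Bool) : Int × Int × Int :=
  let n := s.length
  let prev := prevListB s 0 0
  let nxt := nxtListB n s 0
  let st := (List.range' 1 (n - 1)).foldl
    (fun (st : Int × Int × Int × Int) (i : Nat) =>
      if s.getD i false then st
      else
        let a : Int := (i : Int) - (prev.getD i 0 : Int) - 1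
        let b : Int := (nxt.getD i 0 : Int) - (i : Int) - 1
        let m := min a b
        if m > st.2.2.2 ∨ (m = st.2.2.2 ∧ max a b > st.2.2.2) then ((i : Int), a, b, m)
        else st)
    (0, 0, 0, 0)
  (st.1, st.2.1, st.2.2.1)

-- ===== PRECONDITION & SPEC =====
def Spec_place_next (s : List Bool) (out : Int × Int × Int) : Prop := out = place_next_alt s
instance (s : List Bool) (out : Int × Int × Int) : Decidable (Spec_place_next s out) := by unfold Spec_place_next; infer_instance

-- ===== CLAIM (what is proved, stated in full; the proofs are below) =====
def Claim_equal_place_next : Prop := ∀ (s : List Bool), Dom_place_next s → Spec_place_next s (place_next s)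

-- ===== LEMMAS AND PROOFS =====

-- number of leading falses (= length if no true)
def firstTrue : List Bool → Nat
  | [] => 0
  | x :: xs => if x then 0 else 1 + firstTrue xs

theorem rightScanA_eq (s : List Bool) (k : Nat) :
    rightScanA s k = k + firstTrue (s.drop k) := by
  fun_induction rightScanA s k with
  | case1 k h ih =>
      obtain ⟨hk, hs⟩ := h
      rw [ih, List.drop_eq_getElem_cons hk, firstTrue]
      have : s[k] = false := by
        simpa [List.getD, List.getElem?_eq_getElem hk] using hs
      simp [this]; omega
  | case2 k h =>
      by_cases hk : k < s.length
      · have hs : s.getD k false = true := by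
          rcases Bool.eq_false_or_eq_true (s.getD k false) with h' | h'
          · exact h'
          · exact absurd ⟨hk, h'⟩ h
        have : s[k] = true := by
          simpa [List.getD, List.getElem?_eq_getElem hk] using hs
        rw [List.drop_eq_getElem_cons hk, firstTrue]
        simp [this]
      · rw [List.drop_eq_nil_of_le (by omega)]
        simp [firstTrue]

theorem nxtListB_get (n : Nat) (xs : List Bool) (i0 : Nat) (h : i0 + xs.length = n) :
    ∀ j, j < xs.length → (nxtListB n xs i0).getD j 0 = i0 + j + firstTrue (xs.drop j) := by
  induction xs generalizing i0 with
  | nil => intro j hj; simp at hj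
  | cons x xs ih =>
      intro j hj
      cases j with
      | zero =>
          cases x with
          | true => simp [nxtListB, firstTrue]
          | false =>
              cases xs with
              | nil =>
                  simp only [List.length_cons, List.length_nil] at h
                  simp [nxtListB, firstTrue]; omega
              | cons y ys =>
                  have h2 := ih (i0 + 1) (by simp at h ⊢; omega) 0 (by simp)
                  simp only [List.drop_zero] at h2
                  simp only [nxtListB, List.getD_cons_zero, List.headD_cons,
                    List.drop_zero, firstTrue] at h2 ⊢
                  simp only [Bool.false_eq_true, if_false]
                  rw [h2]; omega
      | succ j =>
          simp only [nxtListB, List.getD_cons_succ, List.drop_succ_cons]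
          have := ih (i0 + 1) (by simp at h ⊢; omega) j (by simpa using hj)
          rw [this]; omega

theorem prevListB_get (s : List Bool) :
    ∀ xs i0 p, xs = s.drop i0 →
      (i0 = 0 → p = 0) → (∀ k, i0 = k + 1 → p = leftScanA s k) →
      ∀ j, j < xs.length → (prevListB xs i0 p).getD j 0 = leftScanA s (i0 + j) := by
  intro xs
  induction xs generalizing s with
  | nil => intro i0 p _ _ _ j hj; simp at hj
  | cons x xs ih =>
      intro i0 p hdrop h0 hsucc j hj
      have hx : s.getD i0 false = x := by
        have : s[i0]? = some x := by
          have h1 : (s.drop i0)[0]? = some x := by rw [← hdrop]; simp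
          simpa using h1
        simp [List.getD, this]
      have hhead : (if x then i0 else p) = leftScanA s i0 := by
        cases i0 with
        | zero => rw [h0 rfl]; cases x <;> simp [leftScanA]
        | succ k =>
            rw [hsucc k rfl, leftScanA, hx]
      cases j with
      | zero => simpa [prevListB] using hhead
      | succ j =>
          simp only [prevListB, List.getD_cons_succ]
          have hdrop' : xs = s.drop (i0 + 1) := by
            have := congrArg List.tail hdrop
            simpa [List.tail_drop] using this
          have := ih s (i0 + 1) (if x then i0 else p) hdrop'
            (fun hh => absurd hh (Nat.succ_ne_zero i0)) (fun k hk => by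
              have hki : k = i0 := by omega
              rw [hki]; exact hhead) j (by simpa using hj)
          rw [this]
          congr 1; omega

-- ===== VERDICT (by name: the statement is the Claim_ definition above) =====
theorem place_next_spec : Claim_equal_place_next := by
  intro s _
  unfold Spec_place_next place_next place_next_alt
  simp only []
  rw [PySem.List.foldl_congr_mem' (g := fun (st : Int × Int × Int × Int) (i : Nat) =>
      if s.getD i false then st
      else
        let a : Int := (i : Int) - ((prevListB s 0 0).getD i 0 : Int) - 1
        let b : Int := ((nxtListB s.length s 0).getD i 0 : Int) - (i : Int) - 1
        let m := min a b
        if m > st.2.2.2 ∨ (m = st.2.2.2 ∧ max a b > st.2.2.2) then ((i : Int), a, b, m)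
        else st)]
  intro i hi st
  have hmem := List.mem_range'_1.mp hi
  have hlt : i < s.length := by omega
  by_cases hs : s.getD i false = true
  · simp only [if_pos hs]
  · have hprev : (prevListB s 0 0).getD i 0 = leftScanA s i := by
      simpa using prevListB_get s s 0 0 (by simp) (fun _ => rfl)
        (fun k hk => by omega) i hlt
    have hnxt : (nxtListB s.length s 0).getD i 0 = rightScanA s i := by
      rw [nxtListB_get s.length s 0 (by simp) i hlt, rightScanA_eq]; omega
    simp only [if_neg hs, hprev, hnxt]
    split_ifs <;> first | rfl | tauto
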